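-- pv_equiv track=rewrite | github.com/pypi-data/pypi-mirror-382 | packages/reposcape/reposcape-0.2.1.tar.gz/reposcape-0.2.1/src/reposcape/analyzers/text.py | _get_first_paragraph
-- ===== SOURCE A (Python) =====
-- def _get_first_paragraph(content: str) -> str:
--     """Extract first non-empty paragraph from text."""
--     lines: list[str] = []
--     for line in content.splitlines():
--         line = line.strip()
--         if not line and lines:
--             break
--         if line:
--             lines.append(line)
--     return " ".join(lines) if lines else ""
-- ===== SOURCE B (Python) =====
-- def _get_first_paragraph(content: str) -> str:
--     """Extract first non-empty paragraph from text."""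
--     tail = [line.strip() for line in content.splitlines()]
--     # phase 1: drop leading blank lines
--     while tail and not tail[0]:
--         tail = tail[1:]
--     # phase 2: take the first contiguous block of non-empty lines
--     block = []
--     while tail and tail[0]:
--         block.append(tail[0])
--         tail = tail[1:]
--     return " ".join(block)
-- ===== Notes on version B (the rewrite author's own statement) =====
-- stated objective: simpler
-- what changed: Replaces the single stateful loop (whose break condition depends on the accumulator being non-empty) by a two-phase drop-leading-blanks / take-non-empty-block pipeline with an unconditional join at the end.
import Mathlib
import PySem

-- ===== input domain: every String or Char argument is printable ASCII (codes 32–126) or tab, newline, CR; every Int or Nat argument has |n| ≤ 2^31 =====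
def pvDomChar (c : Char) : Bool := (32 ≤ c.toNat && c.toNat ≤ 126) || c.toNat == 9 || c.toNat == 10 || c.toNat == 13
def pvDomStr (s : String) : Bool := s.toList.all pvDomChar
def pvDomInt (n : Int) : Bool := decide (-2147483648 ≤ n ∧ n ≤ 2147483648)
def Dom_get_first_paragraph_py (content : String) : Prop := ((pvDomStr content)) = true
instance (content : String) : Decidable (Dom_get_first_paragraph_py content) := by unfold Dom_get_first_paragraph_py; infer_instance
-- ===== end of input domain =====

-- B replaces A's single stateful break-loop by a two-phase drop-blanks / take-block pipeline (simpler decomposition, same cost).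

-- ===== PORT A =====
-- the for-loop of A: state is the accumulated `lines`; break when a stripped line is empty and lines is non-empty
def pvGoA : List String → List String → List String
  | [], lines => lines
  | l :: rest, lines =>
    let line := PySem.Str.strip l
    if line == "" && !lines.isEmpty then lines
    else if line != "" then pvGoA rest (lines ++ [line])
    else pvGoA rest lines

def get_first_paragraph_py (content : String) : String :=
  let lines := pvGoA (PySem.Str.splitlines content) []
  if !lines.isEmpty then PySem.Str.join " " lines else ""

-- ===== PORT B =====
-- phase 1 of B: `while tail and not tail[0]: tail = tail[1:]`
def pvDropB : List String → List String
  | [] => []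
  | s :: rest => if s == "" then pvDropB rest else s :: rest

-- phase 2 of B: `while tail and tail[0]: block.append(tail[0]); tail = tail[1:]`
def pvTakeB : List String → List String
  | [] => []
  | s :: rest => if s != "" then s :: pvTakeB rest else []

def get_first_paragraph_py_alt (content : String) : String :=
  PySem.Str.join " " (pvTakeB (pvDropB ((PySem.Str.splitlines content).map PySem.Str.strip)))

-- ===== PRECONDITION & SPEC =====
def Spec_get_first_paragraph_py (content : String) (out : String) : Prop := out = get_first_paragraph_py_alt content
instance (content : String) (out : String) : Decidable (Spec_get_first_paragraph_py content out) := by unfold Spec_get_first_paragraph_py; infer_instance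

-- ===== CLAIM (what is proved, stated in full; the proofs are below) =====
def Claim_equal_get_first_paragraph_py : Prop := ∀ (content : String), Dom_get_first_paragraph_py content → Spec_get_first_paragraph_py content (get_first_paragraph_py content)

-- ===== LEMMAS AND PROOFS =====

-- once lines is non-empty, A's loop takes exactly the contiguous non-empty prefix
lemma pvGoA_take (ls : List String) : ∀ acc : List String, acc ≠ [] →
    pvGoA ls acc = acc ++ pvTakeB (ls.map PySem.Str.strip) := by
  induction ls with
  | nil => intro acc _; simp [pvGoA, pvTakeB]
  | cons l rest ih =>
    intro acc hacc
    by_cases h : PySem.Str.strip l = ""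
    · simp [pvGoA, pvTakeB, h, List.isEmpty_eq_false_iff.mpr hacc]
    · have hrec := ih (acc ++ [PySem.Str.strip l]) (by simp)
      simp [pvGoA, pvTakeB, h, hrec]

-- with lines empty, A's loop first drops blank lines, then takes the block
lemma pvGoA_eq (ls : List String) :
    pvGoA ls [] = pvTakeB (pvDropB (ls.map PySem.Str.strip)) := by
  induction ls with
  | nil => simp [pvGoA, pvDropB, pvTakeB]
  | cons l rest ih =>
    by_cases h : PySem.Str.strip l = ""
    · simpa [pvGoA, pvDropB, h] using ih
    · have hrec := pvGoA_take rest [PySem.Str.strip l] (by simp)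
      simp [pvGoA, pvDropB, pvTakeB, h, hrec]

-- ===== VERDICT (by name: the statement is the Claim_ definition above) =====
theorem get_first_paragraph_py_spec : Claim_equal_get_first_paragraph_py := by
  intro content _
  unfold Spec_get_first_paragraph_py get_first_paragraph_py get_first_paragraph_py_alt
  rw [pvGoA_eq]
  by_cases h : pvTakeB (pvDropB ((PySem.Str.splitlines content).map PySem.Str.strip)) = []
  · simp [h, PySem.Str.join, PySem.Chars.join, List.intercalate]
  · simp [h]
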